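-- pv_equiv track=rewrite | github.com/pypi-data/pypi-mirror-50 | packages/xlson/xlson-0.1.0.tar.gz/xlson-0.1.0/xlson/xl_preparation.py | get_last_cell
-- ===== SOURCE A (Python) =====
-- def get_last_cell(data_df):
--     max_row = 0
--     max_col = 0
--     for i in range(len(data_df)):
--         for j in range(len(data_df[i])):
--             if data_df[i][j] is not None:
--                 if i > max_row:
--                     max_row = i
--                 if j > max_col:
--                     max_col = j
--     return max_row, max_col
-- ===== SOURCE B (Python) =====
-- def get_last_cell(data_df):
--     max_row = 0
--     for i, row in reversed(list(enumerate(data_df))):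
--         if any(v is not None for v in row):
--             max_row = i
--             break
--     max_col = 0
--     for row in data_df:
--         for j, v in reversed(list(enumerate(row))):
--             if v is not None:
--                 if j > max_col:
--                     max_col = j
--                 break
--     return max_row, max_col
-- ===== Notes on version B (the rewrite author's own statement) =====
-- stated objective: alternative
-- what changed: Replaces A's exhaustive forward nested scan that threads a (max_row, max_col) state over every cell by right-to-left searches with early termination: max_row is the first hit scanning rows from the bottom (break), and max_col folds per-row last-non-None indices, each found by scanning the row from the right and breaking at the first non-None cell.
import Mathlib
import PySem

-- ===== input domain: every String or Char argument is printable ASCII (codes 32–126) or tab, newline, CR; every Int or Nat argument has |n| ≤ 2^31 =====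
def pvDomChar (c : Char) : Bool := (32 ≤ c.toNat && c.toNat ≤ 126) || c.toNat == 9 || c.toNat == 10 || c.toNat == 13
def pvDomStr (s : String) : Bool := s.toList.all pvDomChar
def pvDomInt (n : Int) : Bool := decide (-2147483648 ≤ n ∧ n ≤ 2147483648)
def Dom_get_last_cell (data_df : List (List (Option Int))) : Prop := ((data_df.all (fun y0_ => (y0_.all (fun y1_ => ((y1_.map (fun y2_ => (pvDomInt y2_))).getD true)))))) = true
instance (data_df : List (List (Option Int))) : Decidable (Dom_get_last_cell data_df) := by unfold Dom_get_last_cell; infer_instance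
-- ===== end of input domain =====

-- B replaces A's exhaustive forward nested scan threading a (max_row, max_col) state by
-- right-to-left searches with early termination (break at the first non-None hit per axis/row);
-- objective: alternative (same worst-case cost, different traversal).

-- ===== PORT A =====
-- literal transliteration of A's nested 'for i in range(len(..))' loops with the
-- (max_row, max_col) accumulator; data_df[i] / row[j] are in-range, ported as pyGetD
def get_last_cell (data_df : List (List (Option Int))) : Int × Int :=
  (PySem.List.pyRange 0 (data_df.length : Int) 1).foldl
    (fun (st : Int × Int) i =>
      let row := PySem.List.pyGetD data_df i []
      (PySem.List.pyRange 0 (row.length : Int) 1).foldl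
        (fun (st : Int × Int) j =>
          match PySem.List.pyGetD row j none with
          | none => st
          | some _ =>
            (if i > st.1 then i else st.1, if j > st.2 then j else st.2))
        st)
    (0, 0)

-- ===== PORT B =====
-- Source B first loop: 'for i, row in reversed(list(enumerate(data_df)))' with break at the
-- first row containing a non-None cell; 0 when the loop falls through
def pvAltRow : List (Int × List (Option Int)) → Int
  | [] => 0
  | p :: rest => if p.2.any (fun v => v.isSome) then p.1 else pvAltRow rest

-- Source B inner loop: 'for j, v in reversed(list(enumerate(row)))' with the max_col update
-- and break at the first non-None cell; mc unchanged when the loop falls through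
def pvAltColRow (mc : Int) : List (Int × Option Int) → Int
  | [] => mc
  | p :: rest => if p.2.isSome then (if p.1 > mc then p.1 else mc) else pvAltColRow mc rest

def get_last_cell_alt (data_df : List (List (Option Int))) : Int × Int :=
  let max_row := pvAltRow ((PySem.List.enumerate data_df 0).reverse)
  let max_col := data_df.foldl
    (fun mc row => pvAltColRow mc ((PySem.List.enumerate row 0).reverse)) 0
  (max_row, max_col)

-- ===== PRECONDITION & SPEC =====
def Spec_get_last_cell (data_df : List (List (Option Int))) (out : Int × Int) : Prop := out = get_last_cell_alt data_df
instance (data_df : List (List (Option Int))) (out : Int × Int) : Decidable (Spec_get_last_cell data_df out) := by unfold Spec_get_last_cell; infer_instance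

-- ===== CLAIM (what is proved, stated in full; the proofs are below) =====
def Claim_equal_get_last_cell : Prop := ∀ (data_df : List (List (Option Int))), Dom_get_last_cell data_df → Spec_get_last_cell data_df (get_last_cell data_df)

-- ===== LEMMAS AND PROOFS =====

-- fold over range-with-lookup = fold over enumerate
theorem pv_range_fold {α σ : Type} (xs : List α) (d : α) (g : σ → Int → α → σ)
    (init : σ) :
    (PySem.List.pyRange 0 (xs.length : Int) 1).foldl
        (fun st i => g st i (PySem.List.pyGetD xs i d)) init
      = (PySem.List.enumerate xs 0).foldl (fun st p => g st p.1 p.2) init := by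
  rw [PySem.List.enumerate_eq_map_pyRange xs d, List.foldl_map]
  simp [PySem.List.len]

-- every fst of enumerate xs s is ≥ s
theorem pv_fst_ge {α : Type} {xs : List α} {s : Int} {p : Int × α}
    (hp : p ∈ PySem.List.enumerate xs s) : s ≤ p.1 := by
  rcases (PySem.List.mem_enumerate_iff _ _ _).1 hp with ⟨k, hk, hpe⟩
  subst hpe
  simp only
  omega

-- generic: a left-to-right running-max fold over (index, value) pairs with strictly
-- increasing indices equals the first match of a RIGHT-to-left search
theorem pv_fold_eq_rfind {α : Type} (P : α → Bool) :
    ∀ (l : List (Int × α)) (c : Int), l.Pairwise (fun p q => p.1 < q.1) →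
    l.foldl (fun c q => if P q.2 then (if q.1 > c then q.1 else c) else c) c
      = (match l.reverse.find? (fun p => P p.2) with
         | some p => if p.1 > c then p.1 else c
         | none => c) := by
  intro l
  induction l with
  | nil => intro c _; rfl
  | cons p t ih =>
    intro c hpw
    have hpw' := (List.pairwise_cons.1 hpw)
    simp only [List.foldl_cons, List.reverse_cons, List.find?_append]
    match ht : t.reverse.find? (fun q => P q.2) with
    | some q =>
      have hq : q ∈ t := List.mem_reverse.1 (List.mem_of_find?_eq_some ht)
      have hlt : p.1 < q.1 := hpw'.1 q hq
      rw [ih _ hpw'.2, ht]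
      simp only [Option.some_or]
      split_ifs <;> omega
    | none =>
      rw [ih _ hpw'.2, ht]
      simp only [Option.none_or, List.find?_cons, List.find?_nil]
      cases hP : P p.2 <;> simp

-- pvAltRow is the first match of a find?, with 0 as fallback
theorem pv_altRow_eq (l : List (Int × List (Option Int))) :
    pvAltRow l = (match l.find? (fun p => p.2.any (fun v => v.isSome)) with
                  | some p => p.1
                  | none => 0) := by
  induction l with
  | nil => rfl
  | cons p t ih =>
    simp only [pvAltRow, List.find?_cons]
    cases h : p.2.any (fun v => v.isSome) <;> simp [ih]

-- pvAltColRow is the first match of a find?, with mc as fallback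
theorem pv_altColRow_eq (mc : Int) (l : List (Int × Option Int)) :
    pvAltColRow mc l = (match l.find? (fun p => p.2.isSome) with
                        | some p => if p.1 > mc then p.1 else mc
                        | none => mc) := by
  induction l with
  | nil => rfl
  | cons p t ih =>
    simp only [pvAltColRow, List.find?_cons]
    cases h : p.2.isSome <;> simp [ih]

-- the inner column loop of A: fst tracks the row flag, snd folds the column max
theorem pv_inner (l : List (Int × Option Int)) (i : Int) (st : Int × Int) :
    l.foldl
        (fun (st : Int × Int) p =>
          match p.2 with
          | none => st
          | some _ => (if i > st.1 then i else st.1, if p.1 > st.2 then p.1 else st.2))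
        st
      = ((if l.any (fun p => p.2.isSome) then (if i > st.1 then i else st.1) else st.1),
         l.foldl (fun c p => if p.2.isSome then (if p.1 > c then p.1 else c) else c) st.2) := by
  induction l generalizing st with
  | nil => simp
  | cons p t ih =>
    match hp : p.2 with
    | none =>
      simp only [List.foldl_cons, List.any_cons, hp, Option.isSome_none]
      rw [ih]
      simp
      rw [Bool.false_or]
    | some v =>
      simp only [List.foldl_cons, List.any_cons, hp, Option.isSome_some]
      rw [ih]
      simp only [Bool.true_or, if_true]
      congr 1
      split_ifs <;> omega

theorem pv_any_enum (row : List (Option Int)) :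
    ((PySem.List.enumerate row 0).any (fun p => p.2.isSome)) = row.any (fun v => v.isSome) := by
  conv_rhs => rw [← PySem.List.map_snd_enumerate row 0]
  rw [List.any_map]
  rfl

theorem pv_split {γ : Type} (L : List γ) (f g : Int → γ → Int) (st : Int × Int) :
    L.foldl (fun st q => (f st.1 q, g st.2 q)) st = (L.foldl f st.1, L.foldl g st.2) := by
  induction L generalizing st with
  | nil => rfl
  | cons q t ih => simp only [List.foldl_cons]; exact ih _

-- ===== VERDICT (by name: the statement is the Claim_ definition above) =====
theorem get_last_cell_spec : Claim_equal_get_last_cell := by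
  intro df _
  unfold Spec_get_last_cell
  -- A as a fold over enumerate with a pair state that splits
  have h2 : ∀ (row : List (Option Int)) (i : Int) (st : Int × Int),
      (PySem.List.pyRange 0 (row.length : Int) 1).foldl
          (fun (st : Int × Int) j =>
            match PySem.List.pyGetD row j none with
            | none => st
            | some _ => (if i > st.1 then i else st.1, if j > st.2 then j else st.2)) st
        = ((if row.any (fun v => v.isSome) then (if i > st.1 then i else st.1) else st.1),
           (PySem.List.enumerate row 0).foldl
             (fun c q => if q.2.isSome then (if q.1 > c then q.1 else c) else c) st.2) := by
    intro row i st
    refine Eq.trans (pv_range_fold row none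
      (fun st j v =>
        match v with
        | none => st
        | some _ => (if i > st.1 then i else st.1, if j > st.2 then j else st.2)) st) ?_
    rw [pv_inner, pv_any_enum]
  have h1 : get_last_cell df
      = (PySem.List.enumerate df 0).foldl
          (fun (st : Int × Int) p =>
            ((if p.2.any (fun v => v.isSome) then (if p.1 > st.1 then p.1 else st.1) else st.1),
             (PySem.List.enumerate p.2 0).foldl
               (fun c q => if q.2.isSome then (if q.1 > c then q.1 else c) else c) st.2))
          (0, 0) := by
    refine Eq.trans (pv_range_fold df []
      (fun st i row =>
        (PySem.List.pyRange 0 (row.length : Int) 1).foldl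
          (fun (st : Int × Int) j =>
            match PySem.List.pyGetD row j none with
            | none => st
            | some _ => (if i > st.1 then i else st.1, if j > st.2 then j else st.2)) st)
      (0, 0)) ?_
    simp only [h2]
  rw [h1, pv_split (PySem.List.enumerate df 0)
    (fun r p => if p.2.any (fun v => v.isSome) then (if p.1 > r then p.1 else r) else r)
    (fun c p => (PySem.List.enumerate p.2 0).foldl
      (fun c q => if q.2.isSome then (if q.1 > c then q.1 else c) else c) c) (0, 0)]
  unfold get_last_cell_alt
  rw [Prod.mk.injEq]
  constructor
  · -- rows: running max from 0 over increasing indices = right-to-left first hit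
    rw [pv_fold_eq_rfind (fun row => row.any (fun v => v.isSome))
      (PySem.List.enumerate df 0) 0 (PySem.List.pairwise_lt_enumerate df 0),
      pv_altRow_eq]
    cases h : (PySem.List.enumerate df 0).reverse.find?
        (fun p => p.2.any (fun v => v.isSome)) with
    | none => rfl
    | some p =>
      have hp : p ∈ PySem.List.enumerate df 0 :=
        List.mem_reverse.1 (List.mem_of_find?_eq_some h)
      have h0 : (0 : Int) ≤ p.1 := pv_fst_ge hp
      simp only
      split_ifs with hgt
      · rfl
      · omega
  · -- columns: per-row inner fold = per-row right-to-left first hit, then foldl congr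
    have hf : (fun (c : Int) (row : List (Option Int)) =>
        (PySem.List.enumerate row 0).foldl
          (fun c q => if q.2.isSome then (if q.1 > c then q.1 else c) else c) c)
        = (fun mc row => pvAltColRow mc ((PySem.List.enumerate row 0).reverse)) := by
      funext c row
      rw [pv_fold_eq_rfind (fun v : Option Int => v.isSome)
        (PySem.List.enumerate row 0) c (PySem.List.pairwise_lt_enumerate row 0),
        pv_altColRow_eq]
      cases hx : (PySem.List.enumerate row 0).reverse.find? (fun p => p.2.isSome) <;> rfl
    calc (PySem.List.enumerate df 0).foldl
          (fun c p => (PySem.List.enumerate p.2 0).foldl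
            (fun c q => if q.2.isSome then (if q.1 > c then q.1 else c) else c) c) 0
        = ((PySem.List.enumerate df 0).map (fun p => p.2)).foldl
            (fun c row => (PySem.List.enumerate row 0).foldl
              (fun c q => if q.2.isSome then (if q.1 > c then q.1 else c) else c) c) 0 := by
          rw [List.foldl_map]
      _ = df.foldl (fun c row => (PySem.List.enumerate row 0).foldl
            (fun c q => if q.2.isSome then (if q.1 > c then q.1 else c) else c) c) 0 := by
          rw [PySem.List.map_snd_enumerate]
      _ = _ := by rw [hf]
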